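-- pv_equiv track=rewrite | github.com/tasandy/sideProjects | Python Tutorial/WaterlooOnline.py | postal_code
-- ===== SOURCE A (Python) =====
-- def postal_code(entry):
--     if len(entry) == 7 and entry[0].isalpha() and entry[0].isupper() \
--     and entry[1].isdigit() and entry[2].isalpha() and entry[2].isupper() \
--     and entry[3].isspace() and entry[4].isdigit() and \
--     entry[5].isalpha() and entry[5].isupper() and entry[6].isdigit():
--         return True
--     for i in range(1):
--         return False
-- ===== SOURCE B (Python) =====
-- def postal_code(entry):
--     def tag(c):
--         if c.isalpha() and c.isupper():
--             return 'L'
--         if c.isdigit():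
--             return 'D'
--         if c.isspace():
--             return 'S'
--         return '?'
--     return ''.join(map(tag, entry)) == 'LDLSDLD'
-- ===== Notes on version B (the rewrite author's own statement) =====
-- stated objective: alternative
-- what changed: Instead of testing each fixed index with its own predicate, B maps every character to a class tag (uppercase letter, digit, space, other), joins the tags into a signature string and compares it with the fixed 7-tag template letter-digit-letter-space-digit-letter-digit.
import Mathlib
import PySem

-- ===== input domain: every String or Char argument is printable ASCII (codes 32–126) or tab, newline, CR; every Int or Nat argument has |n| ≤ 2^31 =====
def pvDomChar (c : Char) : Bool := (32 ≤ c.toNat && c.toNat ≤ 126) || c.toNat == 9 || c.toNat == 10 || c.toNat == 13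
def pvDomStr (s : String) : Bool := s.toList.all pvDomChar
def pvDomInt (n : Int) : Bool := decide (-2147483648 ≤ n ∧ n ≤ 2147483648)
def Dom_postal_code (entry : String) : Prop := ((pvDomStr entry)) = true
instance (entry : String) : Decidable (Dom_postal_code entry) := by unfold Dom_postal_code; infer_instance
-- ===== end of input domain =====

-- B classifies each character into a class tag (L/D/S/?) and compares the resulting signature with the template "LDLSDLD" (alternative decomposition; same cost on these fixed-size inputs).


-- ===== PORT A =====
-- literal transliteration of A: length test and ten chained character tests on fixed
-- indices 0..6; when the length test passes the indices are in range, so getD never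
-- supplies its default on a path where it is read (&& short-circuits like Python's and).
def postal_code (entry : String) : Bool :=
  let l := entry.toList
  if (decide (l.length = 7)
      && PySem.Chars.isalpha (l.getD 0 ' ') && PySem.Chars.isupper (l.getD 0 ' ')
      && PySem.Chars.isdigit (l.getD 1 ' ')
      && PySem.Chars.isalpha (l.getD 2 ' ') && PySem.Chars.isupper (l.getD 2 ' ')
      && PySem.Chars.isspace (l.getD 3 ' ')
      && PySem.Chars.isdigit (l.getD 4 ' ')
      && PySem.Chars.isalpha (l.getD 5 ' ') && PySem.Chars.isupper (l.getD 5 ' ')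
      && PySem.Chars.isdigit (l.getD 6 ' ')) then
    true
  else
    -- Python's 'for i in range(1): return False' returns False
    false

-- ===== PORT B =====
-- Source B's tag: first-match classification of one character
def pvTag (c : Char) : Char :=
  if PySem.Chars.isalpha c && PySem.Chars.isupper c then 'L'
  else if PySem.Chars.isdigit c then 'D'
  else if PySem.Chars.isspace c then 'S'
  else '?'

-- ''.join(map(tag, entry)) == 'LDLSDLD'
def postal_code_alt (entry : String) : Bool :=
  decide (entry.toList.map pvTag = "LDLSDLD".toList)

-- ===== PRECONDITION & SPEC =====
def Spec_postal_code (entry : String) (out : Bool) : Prop := out = postal_code_alt entry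
instance (entry : String) (out : Bool) : Decidable (Spec_postal_code entry out) := by unfold Spec_postal_code; infer_instance

-- ===== CLAIM (what is proved, stated in full; the proofs are below) =====
def Claim_equal_postal_code : Prop := ∀ (entry : String), Dom_postal_code entry → Spec_postal_code entry (postal_code entry)

-- ===== LEMMAS AND PROOFS =====
-- the three character classes are pairwise disjoint ASCII/Unicode code-point ranges
theorem upper_not_digit (c : Char) (h : PySem.Chars.isupper c = true) :
    PySem.Chars.isdigit c = false := by
  simp only [PySem.Chars.isupper, PySem.Chars.isdigit, Bool.and_eq_true, decide_eq_true_eq,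
    Bool.and_eq_false_iff, decide_eq_false_iff_not, Char.le_def, UInt32.le_iff_toNat_le,
    show ('A').val.toNat = 65 from rfl, show ('Z').val.toNat = 90 from rfl,
    show ('0').val.toNat = 48 from rfl, show ('9').val.toNat = 57 from rfl] at *
  omega

theorem space_not_upper (c : Char) (h : PySem.Chars.isspace c = true) :
    PySem.Chars.isupper c = false := by
  simp only [PySem.Chars.isspace, PySem.Chars.isupper, Char.toNat, Bool.or_eq_true,
    Bool.and_eq_true, decide_eq_true_eq, Bool.and_eq_false_iff, decide_eq_false_iff_not,
    Char.le_def, UInt32.le_iff_toNat_le,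
    show ('A').val.toNat = 65 from rfl, show ('Z').val.toNat = 90 from rfl] at *
  omega

theorem space_not_digit (c : Char) (h : PySem.Chars.isspace c = true) :
    PySem.Chars.isdigit c = false := by
  simp only [PySem.Chars.isspace, PySem.Chars.isdigit, Char.toNat, Bool.or_eq_true,
    Bool.and_eq_true, decide_eq_true_eq, Bool.and_eq_false_iff, decide_eq_false_iff_not,
    Char.le_def, UInt32.le_iff_toNat_le,
    show ('0').val.toNat = 48 from rfl, show ('9').val.toNat = 57 from rfl] at *
  omega

-- per-character characterisation of Source B's tag
theorem tagL_eq (c : Char) :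
    decide (pvTag c = 'L') = (PySem.Chars.isalpha c && PySem.Chars.isupper c) := by
  unfold pvTag; split_ifs with h1 h2 h3 <;> simp_all

theorem tagD_eq (c : Char) : decide (pvTag c = 'D') = PySem.Chars.isdigit c := by
  unfold pvTag; split_ifs with h1 h2 h3 <;> simp_all
  exact upper_not_digit c h1.2

theorem tagS_eq (c : Char) : decide (pvTag c = 'S') = PySem.Chars.isspace c := by
  unfold pvTag; split_ifs with h1 h2 h3 <;> simp_all
  · cases hs : PySem.Chars.isspace c
    · rfl
    · exact absurd (space_not_upper c hs) (by simp [h1.2])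
  · cases hs : PySem.Chars.isspace c
    · rfl
    · exact absurd (space_not_digit c hs) (by simp [h2])

theorem postal_code_eq_alt (entry : String) : postal_code entry = postal_code_alt entry := by
  unfold postal_code postal_code_alt
  rcases entry.toList with _ | ⟨a, _ | ⟨b, _ | ⟨c, _ | ⟨d, _ | ⟨e, _ | ⟨f, _ | ⟨g, _ | ⟨x, r⟩⟩⟩⟩⟩⟩⟩⟩ <;>
    simp [tagL_eq, tagD_eq, tagS_eq, Bool.and_assoc]

-- ===== VERDICT (by name: the statement is the Claim_ definition above) =====
theorem postal_code_spec : Claim_equal_postal_code := by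
  intro entry _
  exact postal_code_eq_alt entry
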